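-- pv_equiv track=rewrite | github.com/FudanSELab/LinuxKernelKG | pipeline/entity_processor.py | _select_canonical_form
-- ===== SOURCE A (Python) =====
-- def _select_canonical_form(variations: list) -> str:
--     """从变体中选择规范形式
--
--     选择规则：
--     1. 优先选择完整形式而不是缩写
--     2. 优先选择官方文档中更常用的形式
--     3. 如果无法判断，使用最长的形式
--
--     Args:
--         variations: 所有变体的列表，包括原始实体
--
--     Returns:
--         str: 选择的规范形式
--     """
--     if not variations:
--         return ""
--
--     # 按长度排序，最长的可能是完整形式
--     sorted_vars = sorted(variations, key=len, reverse=True)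
--
--     # 检查是否有明显的缩写（全大写且较短）
--     has_abbrev = any(v.isupper() and len(v) <= 5 for v in variations)
--
--     if has_abbrev:
--         # 如果有缩写，选择非缩写的最长形式
--         for var in sorted_vars:
--             if not (var.isupper() and len(var) <= 5):
--                 return var
--
--     # 默认返回最长的形式
--     return sorted_vars[0]
-- ===== SOURCE B (Python) =====
-- def _select_canonical_form(variations: list) -> str:
--     """Single linear pass: track the first-longest variation overall and the
--     first-longest non-abbreviation, plus whether any abbreviation exists."""
--     best = None        # first variation of maximal length
--     best_full = None   # first non-abbreviation of maximal length
--     has_abbrev = False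
--     for v in variations:
--         if best is None or len(v) > len(best):
--             best = v
--         if v.isupper() and len(v) <= 5:
--             has_abbrev = True
--         elif best_full is None or len(v) > len(best_full):
--             best_full = v
--     if best is None:
--         return ""
--     if has_abbrev and best_full is not None:
--         return best_full
--     return best
-- ===== Notes on version B (the rewrite author's own statement) =====
-- stated objective: alternative
-- what changed: A sorts the variations by length (reverse, stable) and then scans the sorted list; B makes one linear pass tracking the first-longest variation, the first-longest non-abbreviation, and whether any abbreviation exists (strict '>' reproduces the stable sort's tie-breaking).
import Mathlib
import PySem

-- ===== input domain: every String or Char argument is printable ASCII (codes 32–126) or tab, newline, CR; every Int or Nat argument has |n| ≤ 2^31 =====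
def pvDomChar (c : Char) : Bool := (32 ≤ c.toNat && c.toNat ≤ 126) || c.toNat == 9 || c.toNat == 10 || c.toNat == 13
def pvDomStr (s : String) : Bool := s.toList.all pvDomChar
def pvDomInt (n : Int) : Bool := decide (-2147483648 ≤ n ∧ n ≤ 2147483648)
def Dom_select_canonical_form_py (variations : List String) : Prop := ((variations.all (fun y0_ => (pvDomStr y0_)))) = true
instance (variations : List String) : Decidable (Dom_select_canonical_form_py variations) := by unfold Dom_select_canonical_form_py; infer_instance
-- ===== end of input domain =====

-- B replaces A's sort-then-scan by one linear pass tracking the first-longest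
-- variation and the first-longest non-abbreviation (objective: alternative, no sort).

-- ===== PORT A =====
-- hand port of Python str.isupper() (exact on the ASCII domain, where the cased
-- characters are exactly the letters): some uppercase letter and no lowercase letter
def pyStrIsupper (s : String) : Bool :=
  s.toList.any PySem.Chars.isupper && s.toList.all (fun c => !PySem.Chars.islower c)

-- `v.isupper() and len(v) <= 5` — the abbreviation test both Pythons spell out
def pyIsAbbrev (v : String) : Bool :=
  pyStrIsupper v && decide (PySem.Str.len v ≤ 5)

def select_canonical_form_py (variations : List String) : String :=
  if variations = [] then ""
  else
    let sorted_vars := PySem.List.sorted variations (fun v => PySem.Str.len v) true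
    let has_abbrev := variations.any pyIsAbbrev
    if has_abbrev then
      match sorted_vars.find? (fun v => !pyIsAbbrev v) with
      | some var => var
      | none => PySem.List.pyGetD sorted_vars 0 ""
    else PySem.List.pyGetD sorted_vars 0 ""

-- ===== PORT B =====
-- state: (best, best_full, has_abbrev)
def scfStep (st : Option String × Option String × Bool) (v : String) :
    Option String × Option String × Bool :=
  let best' : Option String :=
    match st.1 with
    | none => some v
    | some b => if PySem.Str.len b < PySem.Str.len v then some v else some b
  if pyIsAbbrev v then (best', st.2.1, true)
  else
    let bfull' : Option String :=
      match st.2.1 with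
      | none => some v
      | some b => if PySem.Str.len b < PySem.Str.len v then some v else some b
    (best', bfull', st.2.2)

def select_canonical_form_py_alt (variations : List String) : String :=
  let st := variations.foldl scfStep (none, none, false)
  match st.1 with
  | none => ""
  | some best =>
    if st.2.2 then
      match st.2.1 with
      | some bf => bf
      | none => best
    else best

-- ===== PRECONDITION & SPEC =====
def Spec_select_canonical_form_py (variations : List String) (out : String) : Prop := out = select_canonical_form_py_alt variations
instance (variations : List String) (out : String) : Decidable (Spec_select_canonical_form_py variations out) := by unfold Spec_select_canonical_form_py; infer_instance

-- ===== CLAIM (what is proved, stated in full; the proofs are below) =====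
def Claim_equal_select_canonical_form_py : Prop := ∀ (variations : List String), Dom_select_canonical_form_py variations → Spec_select_canonical_form_py variations (select_canonical_form_py variations)

-- ===== LEMMAS AND PROOFS =====

-- head of a reverse-order insertion: the new element takes the head iff strictly greater key
theorem head?_insertBy_key {α : Type} (key : α → Int) (v : α) (r : List α) :
    (PySem.List.insertBy (fun a b => decide (key b < key a)) v r).head? =
      match r.head? with
      | none => some v
      | some y => if key y < key v then some v else some y := by
  cases r with
  | nil => rfl
  | cons y ys =>
    simp only [PySem.List.insertBy, List.head?]
    by_cases h : key y < key v
    · rw [if_pos (by simp [h]), if_pos h]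
    · rw [if_neg (by simp [h]), if_neg h]

-- first p-element after a reverse-order (stable) insertion into a key-descending list
theorem find?_insertBy_key {α : Type} (key : α → Int) (p : α → Bool)
    (v : α) (r : List α) (hr : r.Pairwise (fun a b => key b ≤ key a)) :
    (PySem.List.insertBy (fun a b => decide (key b < key a)) v r).find? p =
      match r.find? p with
      | none => if p v then some v else none
      | some b => if p v && decide (key b < key v) then some v else some b := by
  induction r with
  | nil =>
    by_cases hv : p v
    · simp [PySem.List.insertBy, List.find?_cons_of_pos, hv]
    · simp [PySem.List.insertBy, List.find?_cons_of_neg, hv]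
  | cons y ys ih =>
    rcases List.pairwise_cons.mp hr with ⟨hy, hys⟩
    simp only [PySem.List.insertBy]
    by_cases h : key y < key v
    · rw [if_pos (by simp [h])]
      by_cases hv : p v
      · rw [List.find?_cons_of_pos hv]
        cases hfb : (y :: ys).find? p with
        | none => simp [hv]
        | some b =>
          have hb : b ∈ y :: ys := List.mem_of_find?_eq_some hfb
          have hlb : key b ≤ key y := by
            rcases List.mem_cons.mp hb with h' | h'
            · simp [h']
            · exact hy b h'
          have hbv : key b < key v := lt_of_le_of_lt hlb h
          simp [hv, hbv]
      · rw [List.find?_cons_of_neg (by simp [hv])]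
        cases hfb : (y :: ys).find? p with
        | none => simp [hv]
        | some b => simp [hv]
    · rw [if_neg (by simp [h])]
      by_cases hpy : p y
      · rw [List.find?_cons_of_pos hpy, List.find?_cons_of_pos hpy]
        simp [h]
      · rw [List.find?_cons_of_neg (by simp [hpy]), List.find?_cons_of_neg (by simp [hpy])]
        exact ih hys

-- the single pass computes head, first non-abbreviation and any-abbreviation of the sorted list
theorem scf_fold_eq (xs : List String) :
    xs.foldl scfStep (none, none, false) =
      ((PySem.List.sorted xs (fun v => PySem.Str.len v) true).head?,
       (PySem.List.sorted xs (fun v => PySem.Str.len v) true).find? (fun v => !pyIsAbbrev v),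
       xs.any pyIsAbbrev) := by
  induction xs using List.reverseRecOn with
  | nil => rfl
  | append_singleton ys v ih =>
    have hsorted : PySem.List.sorted (ys ++ [v]) (fun v => PySem.Str.len v) true =
        PySem.List.insertBy (fun a b => decide (PySem.Str.len b < PySem.Str.len a)) v
          (PySem.List.sorted ys (fun v => PySem.Str.len v) true) := by
      rw [PySem.List.sorted_rev_eq_foldl_insertBy, PySem.List.sorted_rev_eq_foldl_insertBy,
        List.foldl_append]
      rfl
    have hpw := PySem.List.sorted_pairwise_rev ys (fun v => PySem.Str.len v)
    rw [List.foldl_append, ih, hsorted, List.foldl_cons, List.foldl_nil,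
      head?_insertBy_key (fun v : String => PySem.Str.len v),
      find?_insertBy_key (fun v : String => PySem.Str.len v) _ _ _ hpw]
    cases hf : (PySem.List.sorted ys (fun v => PySem.Str.len v) true).find?
        (fun v => !pyIsAbbrev v) with
    | none =>
      cases hab : pyIsAbbrev v <;>
        simp only [scfStep, List.any_append, List.any_cons, List.any_nil, Bool.or_true,
          Bool.or_false, hab] <;>
        cases (PySem.List.sorted ys (fun v => PySem.Str.len v) true).head? <;> rfl
    | some b =>
      cases hab : pyIsAbbrev v <;>
        simp only [scfStep, List.any_append, List.any_cons, List.any_nil, Bool.or_true,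
          Bool.or_false, hab] <;>
        by_cases hlt : PySem.Str.len b < PySem.Str.len v <;>
        cases (PySem.List.sorted ys (fun v => PySem.Str.len v) true).head? <;>
        (first | rfl | simp [hlt])

theorem sorted_nonempty_head (xs : List String) (h : xs ≠ []) :
    PySem.List.pyGetD (PySem.List.sorted xs (fun v => PySem.Str.len v) true) 0 "" =
      ((PySem.List.sorted xs (fun v => PySem.Str.len v) true).head?).getD "" := by
  have hlen : PySem.List.sorted xs (fun v => PySem.Str.len v) true ≠ [] := by
    intro hnil
    exact h ((PySem.List.sorted_eq_nil_iff xs _ true).mp hnil)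
  cases hs : PySem.List.sorted xs (fun v => PySem.Str.len v) true with
  | nil => exact absurd hs hlen
  | cons a t => simp [PySem.List.pyGetD, PySem.List.pyIdx?]

-- ===== VERDICT (by name: the statement is the Claim_ definition above) =====
theorem select_canonical_form_py_spec : Claim_equal_select_canonical_form_py := by
  intro xs _
  show select_canonical_form_py xs = select_canonical_form_py_alt xs
  unfold select_canonical_form_py select_canonical_form_py_alt
  rw [scf_fold_eq]
  by_cases hnil : xs = []
  · subst hnil; rfl
  · rw [if_neg hnil]
    have hs : PySem.List.sorted xs (fun v => PySem.Str.len v) true ≠ [] := by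
      intro h; exact hnil ((PySem.List.sorted_eq_nil_iff xs _ true).mp h)
    cases hhead : (PySem.List.sorted xs (fun v => PySem.Str.len v) true).head? with
    | none => exact absurd (List.head?_eq_none_iff.mp hhead) hs
    | some best =>
      have hget : PySem.List.pyGetD (PySem.List.sorted xs (fun v => PySem.Str.len v) true) 0 ""
          = best := by
        rw [sorted_nonempty_head xs hnil, hhead]; rfl
      by_cases hab : xs.any pyIsAbbrev
      · rw [if_pos hab]
        simp only [hab, if_true]
        cases hf : (PySem.List.sorted xs (fun v => PySem.Str.len v) true).find?
            (fun v => !pyIsAbbrev v) with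
        | none => exact hget
        | some bf => rfl
      · rw [if_neg hab]
        simp only [Bool.not_eq_true] at hab
        simp only [hab, Bool.false_eq_true, if_false]
        exact hget
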